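-- pv_equiv track=rewrite | github.com/mikewillekes/perseverance | src/run_pipeline_step_3_clean_field_data.py | normalize_diagnosis
-- ===== SOURCE A (Python) =====
-- import string
-- import unicodedata
--
-- def normalize_diagnosis(raw_diagnosis):
--     # the input column may contain multiple entries separated
--     # by a newline. Gather all values into a new list
--     diagnosis = raw_diagnosis.split('\n')
--
--     # replace all punctuation with whitespace
--     diagnosis = [''.join(char if char not in string.punctuation else ' ' for char in value) for value in diagnosis]
--
--     # strip leading and trailing whitespace
--     diagnosis = [value.strip() for value in diagnosis]
--
--     # lowercase
--     diagnosis = [value.lower() for value in diagnosis]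
--
--     # remove empty records
--     diagnosis = [value for value in diagnosis if value]
--
--     # normalize whitespace
--     diagnosis = [' '.join(value.split()) for value in diagnosis]
--
--     # fold unicode to ascii
--     diagnosis = [''.join(char for char in unicodedata.normalize('NFD', value) if unicodedata.category(char) != 'Mn') for value in diagnosis]
--
--     return diagnosis
-- ===== SOURCE B (Python) =====
-- import string
-- import unicodedata
--
-- PUNCT = set(string.punctuation)
--
-- def normalize_diagnosis(raw_diagnosis):
--     # Character-level state machine: one scan over the raw string (with a
--     # '\n' sentinel to flush the final line). We build words directly:
--     # a word is a maximal run of characters that are neither punctuation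
--     # nor whitespace, lowercased char by char; at each newline the line's
--     # words (if any) are joined with single spaces, unicode-folded and
--     # emitted. No per-line split/strip/join pipeline is ever run.
--     out = []
--     words = []   # completed words of the current line
--     word = []    # characters of the word being built
--     for c in raw_diagnosis + '\n':
--         if c == '\n':
--             if word:
--                 words.append(''.join(word))
--                 word = []
--             if words:
--                 value = ' '.join(words)
--                 # fold unicode to ascii
--                 value = ''.join(ch for ch in unicodedata.normalize('NFD', value)
--                                 if unicodedata.category(ch) != 'Mn')
--                 out.append(value)
--             words = []
--         elif c in PUNCT or c.isspace():
--             if word: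
--                 words.append(''.join(word))
--                 word = []
--         else:
--             word.append(c.lower())
--     return out
-- ===== Notes on version B (the rewrite author's own statement) =====
-- stated objective: alternative
-- what changed: Replaces A's six staged list-building passes (split lines, punctuation map, strip, lower, filter, whitespace collapse, fold) with a character-level state machine: one scan over the raw string with a newline sentinel that builds words and lines directly in accumulators, never running a per-line split/strip/join pipeline.
import Mathlib
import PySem

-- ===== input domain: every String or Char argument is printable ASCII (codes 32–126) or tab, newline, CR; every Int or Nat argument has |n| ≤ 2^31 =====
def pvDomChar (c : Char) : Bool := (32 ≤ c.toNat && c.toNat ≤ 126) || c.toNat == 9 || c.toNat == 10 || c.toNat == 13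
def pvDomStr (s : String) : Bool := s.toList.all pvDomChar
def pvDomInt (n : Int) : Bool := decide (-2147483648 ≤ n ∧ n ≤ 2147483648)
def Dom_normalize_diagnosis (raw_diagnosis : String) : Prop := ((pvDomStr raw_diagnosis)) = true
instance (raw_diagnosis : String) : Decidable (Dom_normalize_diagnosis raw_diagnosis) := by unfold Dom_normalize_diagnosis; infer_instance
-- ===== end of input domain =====

-- B replaces A's six staged list-building passes by a character-level state machine: one scan over
-- the raw string (with a '\n' sentinel) building words and lines in accumulators; objective: alternative.
-- On the printable-ASCII domain the NFD/'Mn' unicode fold of both Pythons is the identity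
-- (ASCII is NFD-normal and contains no 'Mn' characters), so both ports carry it as such; exact on Dom.

-- string.punctuation
def pvPunct : List Char := "!\"#$%&'()*+,-./:;<=>?@[\\]^_`{|}~".toList

-- ===== PORT A =====
def normalize_diagnosis (raw_diagnosis : String) : List String :=
  -- raw_diagnosis.split('\n')
  let diagnosis : List (List Char) := PySem.Chars.splitOn raw_diagnosis.toList ['\n']
  -- replace all punctuation with whitespace (''.join of a per-char comprehension)
  let diagnosis := diagnosis.map (fun value => value.map (fun char => if char ∈ pvPunct then ' ' else char))
  -- strip leading and trailing whitespace
  let diagnosis := diagnosis.map PySem.Chars.strip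
  -- lowercase
  let diagnosis := diagnosis.map PySem.Chars.lower
  -- remove empty records
  let diagnosis := diagnosis.filter (fun value => !value.isEmpty)
  -- normalize whitespace
  let diagnosis := diagnosis.map (fun value => PySem.Chars.join [' '] (PySem.Chars.split₀ value))
  -- fold unicode to ascii: identity on the printable-ASCII domain (exact there: ASCII is
  -- NFD-normal and no ASCII char has category 'Mn')
  diagnosis.map String.ofList

-- ===== PORT B =====
-- one step of B's state machine; state = (out, words of current line, chars of current word)
def pvBStep (st : List String × List (List Char) × List Char) (c : Char) :
    List String × List (List Char) × List Char :=
  match st with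
  | (out, words, word) =>
    if c = '\n' then
      -- if word: words.append(''.join(word)); word = []
      let words := if word.isEmpty then words else words ++ [word]
      -- if words: value = ' '.join(words); NFD/'Mn' fold (identity on the printable-ASCII
      -- domain, see header); out.append(value)
      let out := if words.isEmpty then out
                 else out ++ [String.ofList (PySem.Chars.join [' '] words)]
      (out, [], [])
    else if decide (c ∈ pvPunct) || PySem.Chars.isspace c then
      (out, (if word.isEmpty then words else words ++ [word]), [])
    else
      (out, words, word ++ [PySem.Chars.lowerChar c])

def normalize_diagnosis_alt (raw_diagnosis : String) : List String :=
  -- for c in raw_diagnosis + '\n': …   starting from out = [], words = [], word = []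
  ((raw_diagnosis.toList ++ ['\n']).foldl pvBStep ([], [], [])).1

-- ===== PRECONDITION & SPEC =====
def Spec_normalize_diagnosis (raw_diagnosis : String) (out : List String) : Prop := out = normalize_diagnosis_alt raw_diagnosis
instance (raw_diagnosis : String) (out : List String) : Decidable (Spec_normalize_diagnosis raw_diagnosis out) := by unfold Spec_normalize_diagnosis; infer_instance

-- ===== CLAIM (what is proved, stated in full; the proofs are below) =====
def Claim_equal_normalize_diagnosis : Prop := ∀ (raw_diagnosis : String), Dom_normalize_diagnosis raw_diagnosis → Spec_normalize_diagnosis raw_diagnosis (normalize_diagnosis raw_diagnosis)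

-- ===== LEMMAS AND PROOFS =====

-- "not whitespace"
def pvP (d : Char) : Bool := !PySem.Chars.isspace d

-- B's fused per-character transformation (proof-side abbreviation)
def pvMapC (c : Char) : Char := if c ∈ pvPunct then ' ' else PySem.Chars.lowerChar c

-- a structural model of Python's whitespace str.split()
def pvWords : List Char → List (List Char)
  | [] => []
  | c :: rest =>
    if PySem.Chars.isspace c then pvWords rest
    else (c :: rest.takeWhile pvP) :: pvWords (rest.dropWhile pvP)
termination_by s => s.length
decreasing_by
  · simp
  · simp only [List.length_cons]
    exact Nat.lt_succ_of_le (List.length_dropWhile_le _ _)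

theorem pvWords_nil : pvWords [] = [] := by rw [pvWords.eq_def]

theorem pvWords_cons_space {c : Char} (rest : List Char) (hc : PySem.Chars.isspace c = true) :
    pvWords (c :: rest) = pvWords rest := by rw [pvWords.eq_def]; simp [hc]

theorem pvWords_cons_nospace {c : Char} (rest : List Char) (hc : PySem.Chars.isspace c = false) :
    pvWords (c :: rest) = (c :: rest.takeWhile pvP) :: pvWords (rest.dropWhile pvP) := by
  rw [pvWords.eq_def]; simp [hc]

theorem pv_go_spec (s : List Char) : ∀ cur acc, PySem.Chars.split₀.go s cur acc =
    acc.reverse ++ (if cur.isEmpty then pvWords s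
      else (cur.reverse ++ s.takeWhile pvP) :: pvWords (s.dropWhile pvP)) := by
  induction s with
  | nil =>
    intro cur acc
    cases cur <;> simp [PySem.Chars.split₀.go, pvWords_nil]
  | cons c rest ih =>
    intro cur acc
    by_cases hc : PySem.Chars.isspace c
    · cases cur with
      | nil =>
        simp [PySem.Chars.split₀.go, hc, ih, pvWords_cons_space rest hc]
      | cons d ds =>
        simp [PySem.Chars.split₀.go, hc, ih, List.takeWhile, List.dropWhile, pvP,
          pvWords_cons_space rest hc]
    · have hc' : PySem.Chars.isspace c = false := by simpa using hc
      cases cur with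
      | nil =>
        simp [PySem.Chars.split₀.go, hc, ih, List.takeWhile, List.dropWhile, pvP, hc',
          pvWords_cons_nospace rest hc']
      | cons d ds =>
        simp [PySem.Chars.split₀.go, hc, ih, List.takeWhile, List.dropWhile, pvP]

theorem pv_split₀_eq_pvWords (s : List Char) : PySem.Chars.split₀ s = pvWords s := by
  simpa using pv_go_spec s [] []

theorem pvWords_all_space (ws : List Char) (h : ∀ c ∈ ws, PySem.Chars.isspace c) :
    pvWords ws = [] := by
  induction ws with
  | nil => exact pvWords_nil
  | cons c rest ih =>
    rw [pvWords_cons_space rest (h c (by simp))]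
    exact ih (fun d hd => h d (by simp [hd]))

theorem pvWords_eq_nil_iff (s : List Char) :
    pvWords s = [] ↔ ∀ c ∈ s, PySem.Chars.isspace c := by
  induction s with
  | nil => simp [pvWords_nil]
  | cons c rest ih =>
    by_cases hc : PySem.Chars.isspace c
    · rw [pvWords_cons_space rest hc, ih]
      simp [hc]
    · rw [pvWords_cons_nospace rest (by simpa using hc)]
      simp [hc]

theorem pv_dropWhile_all_fail (ws : List Char) (h : ∀ c ∈ ws, PySem.Chars.isspace c) :
    ws.dropWhile pvP = ws := by
  cases ws with
  | nil => rfl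
  | cons w wrest => simp [List.dropWhile, pvP, h w (by simp)]

theorem pv_takeWhile_all_fail (ws : List Char) (h : ∀ c ∈ ws, PySem.Chars.isspace c) :
    ws.takeWhile pvP = [] := by
  cases ws with
  | nil => rfl
  | cons w wrest => simp [List.takeWhile, pvP, h w (by simp)]

theorem pvWords_append_space (ws : List Char) (h : ∀ c ∈ ws, PySem.Chars.isspace c)
    (s : List Char) : pvWords (s ++ ws) = pvWords s := by
  induction s using pvWords.induct with
  | case1 => rw [List.nil_append, pvWords_all_space ws h, pvWords_nil]
  | case2 c rest hc ih =>
    rw [List.cons_append, pvWords_cons_space _ hc, pvWords_cons_space _ hc]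
    exact ih
  | case3 c rest hc ih =>
    have hc' : PySem.Chars.isspace c = false := by simpa using hc
    rw [List.cons_append, pvWords_cons_nospace _ hc', pvWords_cons_nospace _ hc']
    by_cases hd : rest.dropWhile pvP = []
    · have htake : rest.takeWhile pvP = rest := by
        have := List.takeWhile_append_dropWhile (p := pvP) (l := rest)
        simpa [hd] using this
      rw [List.takeWhile_append, if_pos (by rw [htake]), List.dropWhile_append,
        if_pos (by simp [hd]), pv_takeWhile_all_fail ws h, pv_dropWhile_all_fail ws h,
        List.append_nil, htake, hd, pvWords_all_space ws h, pvWords_nil]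
    · have hlen : ¬ ((rest.takeWhile pvP).length = rest.length) := by
        intro hl
        have hsum := congrArg List.length (List.takeWhile_append_dropWhile (p := pvP) (l := rest))
        simp only [List.length_append] at hsum
        exact hd (List.length_eq_zero_iff.mp (by omega))
      rw [List.takeWhile_append, if_neg hlen, List.dropWhile_append,
        if_neg (by simpa using hd), ih]

theorem pvWords_lstrip (s : List Char) : pvWords (PySem.Chars.lstrip s) = pvWords s := by
  rw [PySem.Chars.lstrip]
  induction s with
  | nil => rfl
  | cons c rest ih =>
    by_cases hc : PySem.Chars.isspace c
    · rw [List.dropWhile_cons_of_pos hc, ih, pvWords_cons_space rest hc]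
    · rw [List.dropWhile_cons_of_neg hc]

theorem pvWords_rstrip (s : List Char) : pvWords (PySem.Chars.rstrip s) = pvWords s := by
  have hs : PySem.Chars.rstrip s ++ (s.reverse.takeWhile PySem.Chars.isspace).reverse = s := by
    rw [PySem.Chars.rstrip, ← List.reverse_append, List.takeWhile_append_dropWhile,
      List.reverse_reverse]
  conv_rhs => rw [← hs]
  rw [pvWords_append_space _ (fun c hc =>
    List.mem_takeWhile_imp (List.mem_reverse.mp hc))]

theorem pvWords_strip (s : List Char) : pvWords (PySem.Chars.strip s) = pvWords s := by
  rw [PySem.Chars.strip, pvWords_rstrip, pvWords_lstrip]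

theorem pv_strip_eq_nil_iff (s : List Char) :
    PySem.Chars.strip s = [] ↔ ∀ c ∈ s, PySem.Chars.isspace c := by
  have h1 : PySem.Chars.strip s = [] ↔ ∀ c ∈ PySem.Chars.lstrip s, PySem.Chars.isspace c := by
    rw [PySem.Chars.strip, PySem.Chars.rstrip]
    constructor
    · intro h c hc
      have h2 : (PySem.Chars.lstrip s).reverse.dropWhile PySem.Chars.isspace = [] := by
        simpa using h
      exact List.dropWhile_eq_nil_iff.mp h2 c (List.mem_reverse.mpr hc)
    · intro h
      have h2 : (PySem.Chars.lstrip s).reverse.dropWhile PySem.Chars.isspace = [] :=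
        List.dropWhile_eq_nil_iff.mpr (fun c hc => h c (List.mem_reverse.mp hc))
      simp [h2]
  rw [h1, PySem.Chars.lstrip]
  constructor
  · intro h c hc
    have hnil : s.dropWhile PySem.Chars.isspace = [] := by
      by_contra hne
      have hhd := List.head_dropWhile_not PySem.Chars.isspace hne
      have hmem := h _ (List.head_mem hne)
      simp [hmem] at hhd
    exact List.dropWhile_eq_nil_iff.mp hnil c hc
  · intro h c hc
    exact h c ((List.dropWhile_sublist PySem.Chars.isspace).subset hc)

-- lowercasing preserves whitespace-ness
theorem pv_isspace_lowerChar (c : Char) :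
    PySem.Chars.isspace (PySem.Chars.lowerChar c) = PySem.Chars.isspace c := by
  rw [PySem.Chars.lowerChar]
  by_cases h : PySem.Chars.isupper c
  · have hb : 'A' ≤ c ∧ c ≤ 'Z' := by simpa [PySem.Chars.isupper] using h
    have h1 : 65 ≤ c.toNat := by
      have := hb.1; simp [Char.le_def] at this; exact this
    have h2 : c.toNat ≤ 90 := by
      have := hb.2; simp [Char.le_def] at this; exact this
    have hv : (c.toNat + 32).isValidChar := Or.inl (by omega)
    have ht : (Char.ofNat (c.toNat + 32)).toNat = c.toNat + 32 := by
      rw [Char.toNat_ofNat, if_pos hv]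
    simp only [h, if_true, PySem.Chars.isspace, ht]
    have e1 : ∀ b : Bool, b = false → ∀ b' : Bool, b' = false → b = b' := by intros; simp_all
    apply e1 <;> try (simp; omega)
  · simp [h]

theorem pvWords_map_lower (s : List Char) :
    pvWords (s.map PySem.Chars.lowerChar) =
    (pvWords s).map (fun w => w.map PySem.Chars.lowerChar) := by
  induction s using pvWords.induct with
  | case1 => simp [pvWords_nil]
  | case2 c rest hc ih =>
    rw [List.map_cons, pvWords_cons_space _ (by rw [pv_isspace_lowerChar]; exact hc),
      pvWords_cons_space rest hc, ih]
  | case3 c rest hc ih =>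
    have hc' : PySem.Chars.isspace c = false := by simpa using hc
    have hpv : (pvP ∘ PySem.Chars.lowerChar) = pvP := by
      funext d; simp [pvP, Function.comp, pv_isspace_lowerChar]
    rw [List.map_cons, pvWords_cons_nospace _ (by rw [pv_isspace_lowerChar]; exact hc'),
      pvWords_cons_nospace rest hc', List.takeWhile_map, List.dropWhile_map, hpv, ih,
      List.map_cons, List.map_cons]

theorem pvWords_lower (s : List Char) :
    pvWords (PySem.Chars.lower s) = (pvWords s).map PySem.Chars.lower := by
  simp only [PySem.Chars.lower]
  exact pvWords_map_lower s

-- per-line: the stripping pass does not change the word list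
theorem pv_line_split (u : List Char) :
    PySem.Chars.split₀ (PySem.Chars.lower (PySem.Chars.strip u)) =
    PySem.Chars.split₀ (PySem.Chars.lower u) := by
  rw [pv_split₀_eq_pvWords, pv_split₀_eq_pvWords, pvWords_lower, pvWords_lower, pvWords_strip]

-- per-line: A's emptiness test agrees with the word-list emptiness test
theorem pv_line_empty (u : List Char) :
    (PySem.Chars.lower (PySem.Chars.strip u)).isEmpty =
    (PySem.Chars.split₀ (PySem.Chars.lower u)).isEmpty := by
  rw [pv_split₀_eq_pvWords, pvWords_lower]
  by_cases h : ∀ c ∈ u, PySem.Chars.isspace c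
  · have e1 : PySem.Chars.strip u = [] := (pv_strip_eq_nil_iff u).mpr h
    have e2 : pvWords u = [] := (pvWords_eq_nil_iff u).mpr h
    simp [e1, e2, PySem.Chars.lower]
  · have e1 : PySem.Chars.strip u ≠ [] := fun hh => h ((pv_strip_eq_nil_iff u).mp hh)
    have e2 : pvWords u ≠ [] := fun hh => h ((pvWords_eq_nil_iff u).mp hh)
    rcases hs : PySem.Chars.strip u with _ | ⟨a, as⟩
    · exact absurd hs e1
    rcases hw : pvWords u with _ | ⟨b, bs⟩
    · exact absurd hw e2
    simp [PySem.Chars.lower]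

-- B's fused per-character transformation equals A's punctuation pass followed by lowercasing
theorem pv_fused (line : List Char) :
    line.map pvMapC = PySem.Chars.lower (line.map (fun c => if c ∈ pvPunct then ' ' else c)) := by
  simp only [PySem.Chars.lower, List.map_map]
  apply List.map_congr_left
  intro c _
  by_cases h : c ∈ pvPunct
  · simp only [Function.comp, pvMapC, h, if_pos]; rfl
  · simp [Function.comp, pvMapC, h]

-- A's five remaining passes collapse to a filtered map over the lines
theorem pv_pipeline (lines : List (List Char)) :
    ((((((lines.map (fun value => value.map (fun char => if char ∈ pvPunct then ' ' else char))).map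
        PySem.Chars.strip).map PySem.Chars.lower).filter (fun value => !value.isEmpty)).map
        (fun value => PySem.Chars.join [' '] (PySem.Chars.split₀ value))).map String.ofList) =
    (lines.filter (fun line => !(PySem.Chars.split₀ (line.map pvMapC)).isEmpty)).map
      (fun line => String.ofList (PySem.Chars.join [' '] (PySem.Chars.split₀ (line.map pvMapC)))) := by
  induction lines with
  | nil => rfl
  | cons l rest ih =>
    simp only [List.map_cons, List.filter_cons]
    have hcond : (!(PySem.Chars.lower (PySem.Chars.strip
        (l.map (fun char => if char ∈ pvPunct then ' ' else char)))).isEmpty) =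
        (!(PySem.Chars.split₀ (l.map pvMapC)).isEmpty) := by
      rw [pv_fused, pv_line_empty]
    rw [hcond]
    cases hb : (!(PySem.Chars.split₀ (l.map pvMapC)).isEmpty) with
    | false => simpa using ih
    | true =>
      simp only [if_true]
      simp only [List.map_cons]
      rw [ih]
      congr 1
      rw [pv_fused, pv_line_split]

-- ========= characterisation of splitOn on '\n' =========

def pvConsHead (w : List Char) : List (List Char) → List (List Char)
  | [] => [w]
  | x :: xs => (w ++ x) :: xs

def pvLinesOf : List Char → List (List Char)
  | [] => [[]]
  | c :: rest => if c = '\n' then [] :: pvLinesOf rest else pvConsHead [c] (pvLinesOf rest)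

theorem pvLinesOf_ne_nil (cs : List Char) : pvLinesOf cs ≠ [] := by
  cases cs with
  | nil => simp [pvLinesOf]
  | cons c rest =>
    simp only [pvLinesOf]
    split
    · simp
    · cases h : pvLinesOf rest <;> simp [pvConsHead]

theorem pvConsHead_nil (ls : List (List Char)) (h : ls ≠ []) : pvConsHead [] ls = ls := by
  cases ls with
  | nil => exact absurd rfl h
  | cons x xs => simp [pvConsHead]

theorem pvConsHead_assoc (a b : List Char) (ls : List (List Char)) :
    pvConsHead a (pvConsHead b ls) = pvConsHead (a ++ b) ls := by
  cases ls <;> simp [pvConsHead]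

theorem pv_go_nl (l : List Char) : ∀ fuel cur acc, l.length < fuel →
    PySem.Chars.splitOn.go ['\n'] fuel l cur acc =
    acc.reverse ++ pvConsHead cur.reverse (pvLinesOf l) := by
  induction l with
  | nil =>
    intro fuel cur acc h
    match fuel, h with
    | fuel + 1, _ =>
      simp [PySem.Chars.splitOn.go, pvLinesOf, pvConsHead]
  | cons c rest ih =>
    intro fuel cur acc h
    match fuel, h with
    | fuel + 1, h =>
      have hr : rest.length < fuel := by simpa using h
      by_cases hc : c = '\n'
      · subst hc
        have hstep : PySem.Chars.splitOn.go ['\n'] (fuel + 1) ('\n' :: rest) cur acc =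
            PySem.Chars.splitOn.go ['\n'] fuel rest [] (cur.reverse :: acc) := by
          rw [PySem.Chars.splitOn.go]
          simp [List.isPrefixOf]
        rw [hstep, ih fuel [] (cur.reverse :: acc) hr]
        rw [List.reverse_nil, pvConsHead_nil _ (pvLinesOf_ne_nil rest),
          show pvLinesOf ('\n' :: rest) = [] :: pvLinesOf rest from by simp [pvLinesOf]]
        simp [pvConsHead]
      · have hstep : PySem.Chars.splitOn.go ['\n'] (fuel + 1) (c :: rest) cur acc =
            PySem.Chars.splitOn.go ['\n'] fuel rest (c :: cur) acc := by
          rw [PySem.Chars.splitOn.go]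
          simp [List.isPrefixOf, Ne.symm hc]
        rw [hstep, ih fuel (c :: cur) acc hr]
        simp [pvLinesOf, hc, pvConsHead_assoc]

theorem pv_splitOn_nl (cs : List Char) :
    PySem.Chars.splitOn cs ['\n'] = pvLinesOf cs := by
  rw [PySem.Chars.splitOn, pv_go_nl cs (cs.length + 1) [] [] (by omega)]
  simp [pvConsHead_nil _ (pvLinesOf_ne_nil cs)]

-- ========= the word machine =========

def pvWordsC : List Char → List Char → List (List Char)
  | w, [] => if w.isEmpty then [] else [w]
  | w, c :: rest =>
    if PySem.Chars.isspace c then (if w.isEmpty then [] else [w]) ++ pvWordsC [] rest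
    else pvWordsC (w ++ [c]) rest

theorem pvWords_take_drop (s : List Char) :
    (if s.takeWhile pvP = [] then pvWords (s.dropWhile pvP)
     else s.takeWhile pvP :: pvWords (s.dropWhile pvP)) = pvWords s := by
  cases s with
  | nil => simp [pvWords_nil]
  | cons c rest =>
    by_cases hc : PySem.Chars.isspace c
    · have : pvP c = false := by simp [pvP, hc]
      simp [List.takeWhile_cons, List.dropWhile_cons, this]
    · have hp : pvP c = true := by simp [pvP, hc]
      simp only [List.takeWhile_cons, List.dropWhile_cons, hp, if_true, reduceCtorEq, if_false]
      rw [pvWords_cons_nospace rest (by simpa using hc)]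

theorem pvWordsC_spec (m : List Char) : ∀ w, pvWordsC w m =
    (if w ++ m.takeWhile pvP = [] then pvWords (m.dropWhile pvP)
     else (w ++ m.takeWhile pvP) :: pvWords (m.dropWhile pvP)) := by
  induction m with
  | nil =>
    intro w
    cases w <;> simp [pvWordsC, pvWords_nil]
  | cons c rest ih =>
    intro w
    by_cases hc : PySem.Chars.isspace c
    · have hp : pvP c = false := by simp [pvP, hc]
      have hrest : pvWordsC [] rest = pvWords rest := by
        rw [ih []]; simpa using pvWords_take_drop rest
      simp only [pvWordsC, hc, if_true, List.takeWhile_cons, List.dropWhile_cons, hp,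
        Bool.false_eq_true, if_false, hrest]
      rw [← pvWords_cons_space rest hc]
      cases w <;> simp
    · have hp : pvP c = true := by simp [pvP, hc]
      simp only [pvWordsC, hc, Bool.false_eq_true, if_false, List.takeWhile_cons,
        List.dropWhile_cons, hp, if_true]
      rw [ih (w ++ [c])]
      simp

theorem pvWordsC_nil_eq (m : List Char) : pvWordsC [] m = pvWords m := by
  rw [pvWordsC_spec m []]; simpa using pvWords_take_drop m

-- the mapped character is whitespace exactly when the original is punctuation or whitespace
theorem pv_mapC_space (c : Char) :
    PySem.Chars.isspace (pvMapC c) = (decide (c ∈ pvPunct) || PySem.Chars.isspace c) := by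
  by_cases h : c ∈ pvPunct
  · simp only [pvMapC, h, if_pos, decide_true, Bool.true_or]
    decide
  · simp [pvMapC, h, pv_isspace_lowerChar]

-- ========= B's machine, line by line =========

def pvEmit (ws : List (List Char)) (w : List Char) (l : List Char) : List String :=
  let words := ws ++ pvWordsC w (l.map pvMapC)
  if words.isEmpty then [] else [String.ofList (PySem.Chars.join [' '] words)]

def pvBres (ws : List (List Char)) (w : List Char) : List (List Char) → List String
  | [] => []
  | l :: rest => pvEmit ws w l ++ pvBres [] [] rest

theorem pv_machine (cs : List Char) : ∀ (out : List String) ws w,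
    (cs ++ ['\n']).foldl pvBStep (out, ws, w) = (out ++ pvBres ws w (pvLinesOf cs), [], []) := by
  induction cs with
  | nil =>
    intro out ws w
    simp only [List.nil_append, List.foldl_cons, List.foldl_nil, pvBStep, if_pos rfl]
    simp only [pvLinesOf, pvBres, pvEmit, List.map_nil, pvWordsC, List.append_nil]
    cases w <;> simp <;> split <;> simp
  | cons c rest ih =>
    intro out ws w
    by_cases hc : c = '\n'
    · subst hc
      simp only [List.cons_append, List.foldl_cons]
      rw [show pvBStep (out, ws, w) '\n' =
        (out ++ pvEmit ws w [], [], []) by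
          simp only [pvBStep, pvEmit, List.map_nil, pvWordsC]
          cases w <;> simp <;> split <;> simp]
      rw [ih]
      simp [pvLinesOf, pvBres, List.append_assoc]
    · obtain ⟨l0, tail, htail⟩ : ∃ l0 tail, pvLinesOf rest = l0 :: tail := by
        cases h : pvLinesOf rest with
        | nil => exact absurd h (pvLinesOf_ne_nil rest)
        | cons a b => exact ⟨a, b, rfl⟩
      have hlines : pvLinesOf (c :: rest) = (c :: l0) :: tail := by
        simp [pvLinesOf, hc, htail, pvConsHead]
      by_cases hb : (decide (c ∈ pvPunct) || PySem.Chars.isspace c) = true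
      · simp only [List.cons_append, List.foldl_cons]
        rw [show pvBStep (out, ws, w) c =
          (out, (if w.isEmpty then ws else ws ++ [w]), []) by
            simp [pvBStep, hc, hb]]
        rw [ih]
        congr 1
        rw [hlines, htail]
        simp only [pvBres]
        congr 1
        simp only [pvEmit, List.map_cons]
        rw [show pvWordsC w (pvMapC c :: l0.map pvMapC) =
          (if w.isEmpty then [] else [w]) ++ pvWordsC [] (l0.map pvMapC) by
            simp only [pvWordsC]
            rw [pv_mapC_space, hb]
            simp]
        cases w <;> simp
      · simp only [List.cons_append, List.foldl_cons]
        rw [show pvBStep (out, ws, w) c =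
          (out, ws, w ++ [PySem.Chars.lowerChar c]) by
            simp [pvBStep, hc, hb]]
        rw [ih]
        congr 1
        rw [hlines, htail]
        simp only [pvBres]
        congr 2
        simp only [pvEmit, List.map_cons]
        rw [show pvWordsC w (pvMapC c :: l0.map pvMapC) =
          pvWordsC (w ++ [PySem.Chars.lowerChar c]) (l0.map pvMapC) by
            simp only [pvWordsC]
            rw [pv_mapC_space]
            simp only [hb, Bool.false_eq_true, if_false]
            have hnp : c ∉ pvPunct := by
              intro hcp
              simp [hcp] at hb
            simp [pvMapC, hnp]]

-- B's machine output is A's filtered map, line by line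
theorem pvBres_filter (lines : List (List Char)) :
    pvBres [] [] lines =
    (lines.filter (fun line => !(PySem.Chars.split₀ (line.map pvMapC)).isEmpty)).map
      (fun line => String.ofList (PySem.Chars.join [' '] (PySem.Chars.split₀ (line.map pvMapC)))) := by
  induction lines with
  | nil => rfl
  | cons l rest ih =>
    simp only [pvBres, List.filter_cons]
    rw [ih]
    simp only [pvEmit, List.nil_append, pvWordsC_nil_eq, ← pv_split₀_eq_pvWords]
    cases hb : (PySem.Chars.split₀ (l.map pvMapC)).isEmpty <;> simp [hb]

-- ===== VERDICT (by name: the statement is the Claim_ definition above) =====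
theorem normalize_diagnosis_spec : Claim_equal_normalize_diagnosis := by
  intro raw _
  unfold Spec_normalize_diagnosis normalize_diagnosis normalize_diagnosis_alt
  simp only
  rw [pv_machine raw.toList [] [] []]
  simp only [List.nil_append]
  rw [pvBres_filter, pv_splitOn_nl]
  exact pv_pipeline _
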